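-- pv_equiv track=rewrite | github.com/Airyshtoteles/learnLeetCode | learnLeetCode_remote/Day24/Part3/detectives_timeline.py | innocent_suspects
-- ===== SOURCE A (Python) =====
-- from bisect import bisect_left, bisect_right
-- from typing import Dict, List
--
-- def innocent_suspects(suspects: Dict[str, List[int]], t_start: int, t_end: int) -> List[str]:
--     res = []
--     for name, times in suspects.items():
--         times_sorted = sorted(times)
--         # find first index >= t_start and first index > t_end
--         i = bisect_left(times_sorted, t_start)
--         j = bisect_right(times_sorted, t_end)
--         if i < j:
--             res.append(name)
--     res.sort()
--     return res
-- ===== SOURCE B (Python) =====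
-- from typing import Dict, List
--
-- def innocent_suspects(suspects: Dict[str, List[int]], t_start: int, t_end: int) -> List[str]:
--     # One linear scan over every timestamp, no per-suspect sorting or binary search:
--     # collect into a set the names that have any timestamp inside [t_start, t_end].
--     hits = set()
--     for name, times in suspects.items():
--         for t in times:
--             if t_start <= t <= t_end:
--                 hits.add(name)
--     return sorted(hits)
-- ===== Notes on version B (the rewrite author's own statement) =====
-- stated objective: simpler
-- what changed: Replaces A's per-suspect sort + double binary search (bisect_left/bisect_right index comparison) by a single linear scan of all timestamps that collects qualifying names into a set, then sorts the set once.
import Mathlib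
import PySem

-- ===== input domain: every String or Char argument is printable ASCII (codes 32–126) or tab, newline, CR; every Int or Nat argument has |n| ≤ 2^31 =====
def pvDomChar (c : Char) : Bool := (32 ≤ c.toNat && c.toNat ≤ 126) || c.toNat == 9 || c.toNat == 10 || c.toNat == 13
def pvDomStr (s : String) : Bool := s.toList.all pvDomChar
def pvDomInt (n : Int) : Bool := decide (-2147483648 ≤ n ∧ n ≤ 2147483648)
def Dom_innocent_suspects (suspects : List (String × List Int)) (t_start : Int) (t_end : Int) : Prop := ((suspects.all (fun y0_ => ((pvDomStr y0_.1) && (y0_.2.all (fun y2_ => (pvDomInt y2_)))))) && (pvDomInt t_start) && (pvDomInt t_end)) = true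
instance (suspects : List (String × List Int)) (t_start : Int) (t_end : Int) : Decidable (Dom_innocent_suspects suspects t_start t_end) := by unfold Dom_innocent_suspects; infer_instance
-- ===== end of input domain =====

-- B replaces A's per-suspect sort + two bisects by one linear scan over all timestamps
-- collecting qualifying names into a set, then a single sort of that set (objective: simpler).

-- ===== PORT A =====
def innocent_suspects (suspects : List (String × List Int)) (t_start : Int) (t_end : Int) : List String :=
  let d := PySem.Dict.ofList suspects
  let res : List String := d.items.foldl (fun res nt =>
    let times_sorted := PySem.List.sorted nt.2 (fun x => x) false
    let i := PySem.List.bisectLeft times_sorted t_start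
    let j := PySem.List.bisectRight times_sorted t_end
    if i < j then res ++ [nt.1] else res) []
  PySem.List.sorted res (fun x => x) false

-- ===== PORT B =====
def innocent_suspects_alt (suspects : List (String × List Int)) (t_start : Int) (t_end : Int) : List String :=
  let d := PySem.Dict.ofList suspects
  let hits : PySem.Set String := d.items.foldl (fun hits nt =>
    nt.2.foldl (fun hits t =>
      if t_start ≤ t ∧ t ≤ t_end then PySem.Set.add hits nt.1 else hits) hits) PySem.Set.empty
  PySem.List.sorted hits (fun x => x) false

-- ===== PRECONDITION & SPEC =====
def Spec_innocent_suspects (suspects : List (String × List Int)) (t_start : Int) (t_end : Int) (out : List String) : Prop := out = innocent_suspects_alt suspects t_start t_end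
instance (suspects : List (String × List Int)) (t_start : Int) (t_end : Int) (out : List String) : Decidable (Spec_innocent_suspects suspects t_start t_end out) := by unfold Spec_innocent_suspects; infer_instance

-- ===== CLAIM (what is proved, stated in full; the proofs are below) =====
def Claim_equal_innocent_suspects : Prop := ∀ (suspects : List (String × List Int)) (t_start : Int) (t_end : Int), Dom_innocent_suspects suspects t_start t_end → Spec_innocent_suspects suspects t_start t_end (innocent_suspects suspects t_start t_end)

-- ===== LEMMAS AND PROOFS =====

-- A's bisect test on the sorted copy finds a timestamp in [s, e] iff one exists.
theorem bisect_test_iff (s e : Int) (ts : List Int) :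
    (PySem.List.bisectLeft (PySem.List.sorted ts (fun x => x) false) s <
      PySem.List.bisectRight (PySem.List.sorted ts (fun x => x) false) e) ↔
    (∃ t ∈ ts, s ≤ t ∧ t ≤ e) := by
  set xs := PySem.List.sorted ts (fun x => x) false with hxs
  have hpair : List.Pairwise (fun a b => a ≤ b) xs := PySem.List.sorted_pairwise ts (fun x => x)
  obtain ⟨hL1, hL2, hL3⟩ := PySem.List.bisectLeft_spec xs s hpair
  obtain ⟨hR1, hR2, hR3⟩ := PySem.List.bisectRight_spec xs e hpair
  constructor
  · intro h
    have hi : PySem.List.bisectLeft xs s < xs.length := lt_of_lt_of_le h hR1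
    refine ⟨xs[PySem.List.bisectLeft xs s], ?_, ?_, ?_⟩
    · exact (PySem.List.mem_sorted ts (fun x => x) false _).mp
        (by rw [← hxs]; exact List.getElem_mem hi)
    · exact hL3 _ hi (le_refl _)
    · exact hR2 _ hi h
  · rintro ⟨t, ht, hst, hte⟩
    have htx : t ∈ xs := (PySem.List.mem_sorted ts (fun x => x) false t).mpr ht
    obtain ⟨k, hk, hkt⟩ := List.mem_iff_getElem.mp htx
    by_contra hcon
    rw [Nat.not_lt] at hcon
    by_cases hki : k < PySem.List.bisectLeft xs s
    · have := hL2 k hk hki; omega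
    · have hjk : PySem.List.bisectRight xs e ≤ k := by omega
      have := hR3 k hk hjk; omega

-- B's inner loop over one suspect's timestamps: add the name once iff some timestamp qualifies.
theorem inner_fold_eq (s e : Int) (name : String) (ts : List Int) (h : PySem.Set String) :
    ts.foldl (fun h t => if s ≤ t ∧ t ≤ e then PySem.Set.add h name else h) h =
      (if ts.any (fun t => decide (s ≤ t ∧ t ≤ e)) then PySem.Set.add h name else h) := by
  induction ts generalizing h with
  | nil => simp
  | cons t ts ih =>
    rw [List.foldl_cons, List.any_cons]
    by_cases hc : s ≤ t ∧ t ≤ e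
    · rw [if_pos hc, ih, decide_eq_true hc, Bool.true_or, if_pos rfl]
      have hadd : PySem.Set.add (PySem.Set.add h name) name = PySem.Set.add h name := by
        simp [PySem.Set.add, PySem.Set.contains]
        split <;> simp_all
      split
      · exact hadd
      · rfl
    · rw [if_neg hc, ih, decide_eq_false hc, Bool.false_or]

-- B's outer loop: with pairwise-distinct names none of which is already in the set,
-- it appends exactly the qualifying names in order.
theorem outer_fold_eq (s e : Int) (items : List (String × List Int)) (acc : PySem.Set String)
    (hnd : (items.map Prod.fst).Nodup) (hdis : ∀ n ∈ items.map Prod.fst, n ∉ acc) :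
    items.foldl (fun h nt =>
        nt.2.foldl (fun h t => if s ≤ t ∧ t ≤ e then PySem.Set.add h nt.1 else h) h) acc =
      acc ++ (items.filter (fun nt => nt.2.any (fun t => decide (s ≤ t ∧ t ≤ e)))).map Prod.fst := by
  induction items generalizing acc with
  | nil => simp
  | cons nt rest ih =>
    simp only [List.map_cons, List.nodup_cons, List.mem_cons] at hnd hdis
    have hacc : nt.1 ∉ acc := hdis nt.1 (Or.inl rfl)
    have haddeq : PySem.Set.add acc nt.1 = acc ++ [nt.1] := by
      simp only [PySem.Set.add, PySem.Set.contains]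
      rw [if_neg]
      simp only [List.contains_eq_mem, decide_eq_true_eq]
      exact hacc
    simp only [List.foldl_cons, List.filter_cons]
    rw [inner_fold_eq]
    by_cases hq : nt.2.any (fun t => decide (s ≤ t ∧ t ≤ e))
    · rw [if_pos hq, haddeq, ih (acc ++ [nt.1]) hnd.2 ?hd, if_pos hq]
      · simp
      case hd =>
        intro n hn
        simp only [List.mem_append, List.mem_singleton]
        rintro (h1 | h2)
        · exact hdis n (Or.inr hn) h1
        · exact hnd.1 (h2 ▸ hn)
    · rw [if_neg hq, ih acc hnd.2 (fun n hn => hdis n (Or.inr hn)), if_neg hq]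

theorem innocent_suspects_eq_alt (suspects : List (String × List Int)) (t_start t_end : Int) :
    innocent_suspects suspects t_start t_end = innocent_suspects_alt suspects t_start t_end := by
  unfold innocent_suspects innocent_suspects_alt
  simp only
  set items := (PySem.Dict.ofList suspects).items with hitems
  have hnd : (items.map Prod.fst).Nodup := PySem.Dict.nodup_keys_ofList suspects
  have hfun : (fun (res : List String) (nt : String × List Int) =>
      if PySem.List.bisectLeft (PySem.List.sorted nt.2 (fun x => x) false) t_start <
         PySem.List.bisectRight (PySem.List.sorted nt.2 (fun x => x) false) t_end
      then res ++ [nt.1] else res) =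
      (fun res nt =>
        if (fun nt => decide
            (PySem.List.bisectLeft (PySem.List.sorted nt.2 (fun x => x) false) t_start <
             PySem.List.bisectRight (PySem.List.sorted nt.2 (fun x => x) false) t_end)) nt = true
        then res ++ [nt.1] else res) := by
    funext res nt; simp
  rw [hfun, PySem.List.foldl_append_if
      (fun nt => decide (PySem.List.bisectLeft (PySem.List.sorted nt.2 (fun x => x) false) t_start <
        PySem.List.bisectRight (PySem.List.sorted nt.2 (fun x => x) false) t_end))
      Prod.fst items []]
  rw [outer_fold_eq t_start t_end items PySem.Set.empty hnd (by simp [PySem.Set.empty])]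
  have hfil : items.filter (fun nt => decide
        (PySem.List.bisectLeft (PySem.List.sorted nt.2 (fun x => x) false) t_start <
         PySem.List.bisectRight (PySem.List.sorted nt.2 (fun x => x) false) t_end)) =
      items.filter (fun nt => nt.2.any (fun t => decide (t_start ≤ t ∧ t ≤ t_end))) := by
    apply List.filter_congr
    intro nt _
    have h := bisect_test_iff t_start t_end nt.2
    apply Bool.eq_iff_iff.mpr
    simp only [decide_eq_true_eq, List.any_eq_true]
    exact h
  rw [hfil]
  rfl

-- ===== VERDICT (by name: the statement is the Claim_ definition above) =====
theorem innocent_suspects_spec : Claim_equal_innocent_suspects := by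
  intro suspects t_start t_end _
  unfold Spec_innocent_suspects
  exact innocent_suspects_eq_alt suspects t_start t_end
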